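-- pv_equiv track=rewrite | github.com/fluiddyn/fluiddyn | fluiddyn/util/matlab2py/cleanmat.py | modif_space_after_comma
-- ===== SOURCE A (Python) =====
-- def is_comment_line(line):
--     return line.strip().startswith("%")
--
-- def modif_space_after_comma(code_lines):
--     lines_new = []
--     for line in code_lines:
--
--         if is_comment_line(line):
--             lines_new.append(line)
--             continue
--
--         parts = line.split(",")
--
--         new_line = ""
--         for i, part in enumerate(parts[:-1]):
--             new_line += part + ","
--
--             if not parts[i + 1].startswith(" "):
--                 new_line += " "
--
--         new_line += parts[-1]
--         lines_new.append(new_line)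
--
--     return lines_new
-- ===== SOURCE B (Python) =====
-- def modif_space_after_comma(code_lines):
--     def fix(line):
--         out = []
--         for i, ch in enumerate(line):
--             out.append(ch)
--             if ch == "," and line[i + 1 : i + 2] != " ":
--                 out.append(" ")
--         return "".join(out)
--
--     return [
--         line if line.strip().startswith("%") else fix(line)
--         for line in code_lines
--     ]
-- ===== Notes on version B (the rewrite author's own statement) =====
-- stated objective: simpler
-- what changed: A splits each code line on ',' and rejoins the parts with an indexed lookahead into the parts list; B does one left-to-right character scan over the line, inserting a space after each comma whose next character is not already a space.
import Mathlib
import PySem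

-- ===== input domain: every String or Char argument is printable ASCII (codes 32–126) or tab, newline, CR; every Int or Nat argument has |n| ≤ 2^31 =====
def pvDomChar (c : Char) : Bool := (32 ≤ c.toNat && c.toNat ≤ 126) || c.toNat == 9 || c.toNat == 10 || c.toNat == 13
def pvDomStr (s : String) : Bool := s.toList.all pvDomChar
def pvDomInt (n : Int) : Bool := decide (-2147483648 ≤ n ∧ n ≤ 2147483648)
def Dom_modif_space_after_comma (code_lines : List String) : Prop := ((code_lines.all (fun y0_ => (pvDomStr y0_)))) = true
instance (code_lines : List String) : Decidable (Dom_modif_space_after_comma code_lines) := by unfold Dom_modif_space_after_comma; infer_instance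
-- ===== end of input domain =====

-- B replaces A's split-on-comma + indexed lookahead join by one simpler left-to-right
-- character scan inserting a space after each comma not already followed by one (alternative decomposition, similar cost).


-- ===== PORT A =====
-- is_comment_line(line) = line.strip().startswith("%")
def pvIsCommentLine (line : String) : Bool :=
  PySem.Str.startswith (PySem.Str.strip line) "%"

-- the body of A's inner loop: for i, part in enumerate(parts[:-1]): new_line += part + ","; if not parts[i+1].startswith(" "): new_line += " "
-- followed by new_line += parts[-1]  (parts[:-1] ported as dropLast, parts[-1] as pyGetD parts (-1))
def pvAJoin (parts : List (List Char)) : List Char :=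
  ((PySem.List.enumerate parts.dropLast).foldl
    (fun new_line ip =>
      if ¬ (PySem.Chars.startswith (PySem.List.pyGetD parts (ip.1 + 1) []) [' ']) then
        new_line ++ ip.2 ++ [','] ++ [' ']
      else new_line ++ ip.2 ++ [',']) [])
  ++ PySem.List.pyGetD parts (-1) []

def modif_space_after_comma (code_lines : List String) : List String :=
  code_lines.foldl
    (fun lines_new line =>
      if pvIsCommentLine line then lines_new ++ [line]
      else lines_new ++ [String.ofList (pvAJoin (PySem.Chars.splitOn line.toList [',']))])
    []

-- ===== PORT B =====
-- B's per-line scan: append each char; after a ',' whose successor is not ' ', also append ' '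
def pvIns : List Char → List Char
  | [] => []
  | c :: rest =>
      if c = ',' ∧ rest.head? ≠ some ' ' then c :: ' ' :: pvIns rest
      else c :: pvIns rest

def modif_space_after_comma_alt (code_lines : List String) : List String :=
  code_lines.map (fun line =>
    if PySem.Str.startswith (PySem.Str.strip line) "%" then line
    else String.ofList (pvIns line.toList))

-- ===== PRECONDITION & SPEC =====
def Spec_modif_space_after_comma (code_lines : List String) (out : List String) : Prop := out = modif_space_after_comma_alt code_lines
instance (code_lines : List String) (out : List String) : Decidable (Spec_modif_space_after_comma code_lines out) := by unfold Spec_modif_space_after_comma; infer_instance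

-- ===== CLAIM (what is proved, stated in full; the proofs are below) =====
def Claim_equal_modif_space_after_comma : Prop := ∀ (code_lines : List String), Dom_modif_space_after_comma code_lines → Spec_modif_space_after_comma code_lines (modif_space_after_comma code_lines)

-- ===== LEMMAS AND PROOFS =====

theorem pvModifyHead_id {α : Type} (l : List α) : List.modifyHead (fun x => x) l = l := by
  cases l <;> simp

-- structural model of line.split(",")
def pvSp : List Char → List (List Char)
  | [] => [[]]
  | c :: rest => if c = ',' then [] :: pvSp rest else (pvSp rest).modifyHead (c :: ·)

theorem pvSp_ne_nil (cs : List Char) : pvSp cs ≠ [] := by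
  induction cs with
  | nil => simp [pvSp]
  | cons c rest ih =>
    simp only [pvSp]
    split
    · simp
    · cases h : pvSp rest with
      | nil => exact absurd h ih
      | cons p ps => simp

theorem pvSplitOn_go_eq (l : List Char) : ∀ (fuel : Nat) (cur : List Char)
    (acc : List (List Char)), l.length ≤ fuel →
    PySem.Chars.splitOn.go [','] fuel l cur acc
      = acc.reverse ++ (pvSp l).modifyHead (cur.reverse ++ ·) := by
  induction l with
  | nil =>
    intro fuel cur acc _
    cases fuel <;> simp [PySem.Chars.splitOn.go, pvSp]
  | cons c rest ih =>
    intro fuel cur acc hf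
    cases fuel with
    | zero => simp at hf
    | succ f =>
      rw [PySem.Chars.splitOn.go.eq_def]
      simp only [List.isPrefixOf, List.length_cons] at hf ⊢
      by_cases hc : c = ','
      · subst hc
        simp only [BEq.rfl, Bool.true_and, if_true]
        rw [show List.drop ([].length + 1) (',' :: rest) = rest by simp,
          ih f [] (cur.reverse :: acc) (by omega)]
        simp only [pvSp, if_true]
        cases pvSp rest <;> simp
      · rw [if_neg (by simpa using Ne.symm hc)]
        rw [ih f (c :: cur) acc (by omega)]
        simp only [pvSp, if_neg hc]
        cases h : pvSp rest with
        | nil => exact absurd h (pvSp_ne_nil rest)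
        | cons p ps => simp

theorem pvSplitOn_eq (cs : List Char) : PySem.Chars.splitOn cs [','] = pvSp cs := by
  unfold PySem.Chars.splitOn
  rw [pvSplitOn_go_eq cs (cs.length + 1) [] [] (by omega)]
  simp [pvModifyHead_id]

-- structural model of A\'s join (adjacent-pair recursion)
def pvJ : List (List Char) → List Char
  | [] => []
  | [p] => p
  | p :: q :: ps =>
      p ++ ',' :: ((if PySem.Chars.startswith q [' '] then [] else [' ']) ++ pvJ (q :: ps))

-- the enumerate-fold with lookups into `big` is the fold over the zip with the listed successors
theorem pvFold_enum_zip (step : List Char → List Char → List Char → List Char) :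
    ∀ (xs ys big : List (List Char)) (s : Int) (acc : List Char),
    xs.length = ys.length →
    (∀ k : Nat, (hk : k < ys.length) → PySem.List.pyGetD big (s + k + 1) [] = ys[k]) →
    (PySem.List.enumerate xs s).foldl
        (fun acc ip => step acc ip.2 (PySem.List.pyGetD big (ip.1 + 1) [])) acc
      = (xs.zip ys).foldl (fun acc pq => step acc pq.1 pq.2) acc := by
  intro xs
  induction xs with
  | nil => intro ys big s acc _ _; simp [PySem.List.enumerate]
  | cons x xt ih =>
    intro ys big s acc hlen hget
    cases ys with
    | nil => simp at hlen
    | cons y yt =>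
      rw [PySem.List.enumerate_cons]
      simp only [List.zip_cons_cons, List.foldl_cons]
      have h0 := hget 0 (by simp)
      simp only [Nat.cast_zero, add_zero] at h0
      rw [h0]
      exact ih yt big (s + 1) _ (by simpa using hlen)
        (fun k hk => by
          have := hget (k + 1) (by simpa using Nat.succ_lt_succ hk)
          simpa [add_assoc, add_comm, add_left_comm] using this)

theorem pvZip_fold_J :
    ∀ (ps : List (List Char)) (p : List Char) (acc : List Char),
    (((p :: ps).dropLast.zip ps).foldl
        (fun acc pq =>
          if ¬ (PySem.Chars.startswith pq.2 [' ']) then acc ++ pq.1 ++ [','] ++ [' ']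
          else acc ++ pq.1 ++ [',']) acc)
        ++ (p :: ps).getLastD []
      = acc ++ pvJ (p :: ps) := by
  intro ps
  induction ps with
  | nil => intro p acc; simp [pvJ]
  | cons q qs ih =>
    intro p acc
    rw [List.dropLast_cons₂]
    simp only [List.zip_cons_cons, List.foldl_cons]
    rw [show (p :: q :: qs).getLastD ([] : List Char) = (q :: qs).getLastD [] from rfl]
    rw [ih q _]
    by_cases hs : PySem.Chars.startswith q [' '] = true <;> simp [pvJ, hs]

theorem pvGetD_neg_one (xs : List (List Char)) (h : xs ≠ []) :
    PySem.List.pyGetD xs (-1) [] = xs.getLastD [] := by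
  simp only [PySem.List.pyGetD, PySem.List.pyGet?, PySem.List.pyIdx?]
  have hn : 0 < xs.length := List.length_pos_iff.mpr h
  rw [if_neg (by omega), if_pos (by omega)]
  simp only [Option.bind_some]
  rw [show (-(-1 : Int)).toNat = 1 from rfl]
  simp [List.getLastD_eq_getLast?, List.getLast?_eq_getElem?]

theorem pvAJoin_eq_J (p : List Char) (ps : List (List Char)) :
    pvAJoin (p :: ps) = pvJ (p :: ps) := by
  unfold pvAJoin
  rw [pvGetD_neg_one _ (by simp)]
  rw [pvFold_enum_zip
    (fun acc p q =>
      if ¬ (PySem.Chars.startswith q [' ']) then acc ++ p ++ [','] ++ [' ']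
      else acc ++ p ++ [','])
    (p :: ps).dropLast ps (p :: ps) 0 []
    (by simp [List.length_dropLast])
    (fun k hk => by
      have hk2 : k + 1 < (p :: ps).length := by simpa using Nat.succ_lt_succ hk
      rw [show (0 : Int) + k + 1 = ((k + 1 : Nat) : Int) by push_cast; ring,
        PySem.List.pyGetD_natCast, List.getD_eq_getElem _ _ hk2]
      simp)]
  rw [pvZip_fold_J ps p []]
  simp

theorem pvStartswith_space (q : List Char) :
    PySem.Chars.startswith q [' '] = (q.head? == some ' ') := by
  cases q with
  | nil => rfl
  | cons c cs =>
    simp only [PySem.Chars.startswith, List.isPrefixOf, List.head?_cons]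
    cases hc : (' ' == c) <;> simp_all [BEq.comm]

theorem pvSp_head (cs : List Char) (p : List Char) (ps : List (List Char))
    (h : pvSp cs = p :: ps) :
    PySem.Chars.startswith p [' '] = (cs.head? == some ' ') := by
  cases cs with
  | nil =>
    simp only [pvSp] at h
    injection h with h1 h2
    simp [← h1, pvStartswith_space]
  | cons c rest =>
    simp only [pvSp] at h
    by_cases hc : c = ','
    · rw [if_pos hc] at h
      subst hc
      injection h with h1 h2
      simp [← h1, pvStartswith_space]
    · rw [if_neg hc] at h
      cases hsp : pvSp rest with
      | nil => exact absurd hsp (pvSp_ne_nil rest)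
      | cons q qs =>
        rw [hsp] at h
        simp only [List.modifyHead_cons] at h
        injection h with h1 h2
        rw [← h1, pvStartswith_space]
        simp

theorem pvJ_cons_head (c : Char) (p : List Char) (ps : List (List Char)) :
    pvJ ((c :: p) :: ps) = c :: pvJ (p :: ps) := by
  cases ps with
  | nil => rfl
  | cons q qs => simp [pvJ]

theorem pvJ_sp_eq_ins (cs : List Char) : pvJ (pvSp cs) = pvIns cs := by
  induction cs with
  | nil => rfl
  | cons c rest ih =>
    by_cases hc : c = ','
    · subst hc
      simp only [pvSp, if_true, pvIns]
      cases hsp : pvSp rest with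
      | nil => exact absurd hsp (pvSp_ne_nil rest)
      | cons q qs =>
        rw [hsp] at ih
        have hq := pvSp_head rest q qs hsp
        by_cases hh : rest.head? = some ' ' <;>
          simp [pvJ, hq, hh, ih]
    · simp only [pvSp, if_neg hc, pvIns]
      rw [if_neg (fun h => hc h.1)]
      cases hsp : pvSp rest with
      | nil => exact absurd hsp (pvSp_ne_nil rest)
      | cons q qs =>
        rw [hsp] at ih
        simp only [List.modifyHead_cons, pvJ_cons_head, ih]

theorem pvLine_eq (line : String) :
    pvAJoin (PySem.Chars.splitOn line.toList [',']) = pvIns line.toList := by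
  rw [pvSplitOn_eq]
  cases hsp : pvSp line.toList with
  | nil => exact absurd hsp (pvSp_ne_nil _)
  | cons p ps => rw [pvAJoin_eq_J, ← hsp, pvJ_sp_eq_ins]

theorem pvMain (code_lines : List String) :
    modif_space_after_comma code_lines = modif_space_after_comma_alt code_lines := by
  unfold modif_space_after_comma modif_space_after_comma_alt
  rw [show (fun (lines_new : List String) (line : String) =>
      if pvIsCommentLine line then lines_new ++ [line]
      else lines_new ++ [String.ofList (pvAJoin (PySem.Chars.splitOn line.toList [',']))])
    = (fun lines_new line => lines_new ++
        [if PySem.Str.startswith (PySem.Str.strip line) "%" then line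
         else String.ofList (pvIns line.toList)]) by
    funext lines_new line
    unfold pvIsCommentLine
    split <;> simp_all [pvLine_eq]]
  exact PySem.List.foldl_append_singleton_eq_map _ _ _

-- ===== VERDICT (by name: the statement is the Claim_ definition above) =====
theorem modif_space_after_comma_spec : Claim_equal_modif_space_after_comma := by
  intro code_lines _
  unfold Spec_modif_space_after_comma
  exact pvMain code_lines
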